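-- pv_equiv track=rewrite | github.com/quoccuongLE/metacareers_coding_puzzles | level_1/kaitenzushi.py | getMaximumEatenDishCount
-- ===== SOURCE A (Python) =====
-- from typing import List
--
-- def getMaximumEatenDishCount(N: int, D: List[int], K: int) -> int:
--   # Write your code here
--   window = {}
--   eaten_counter = 0
--
--   for d in D:
--     if not d in window or (eaten_counter - window[d]) > K:
--       window[d] = eaten_counter
--       eaten_counter += 1
--   return eaten_counter
-- ===== SOURCE B (Python) =====
-- from collections import deque
-- from typing import List
--
-- def getMaximumEatenDishCount(N: int, D: List[int], K: int) -> int: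
--   # Sliding window of the K most recently eaten dishes: deque for order,
--   # set for O(1) membership, explicit FIFO eviction.
--   recent = deque()
--   recent_set = set()
--   count = 0
--   for d in D:
--     if d not in recent_set:
--       recent.append(d)
--       recent_set.add(d)
--       count += 1
--       if len(recent) > K:
--         recent_set.discard(recent.popleft())
--   return count
-- ===== Notes on version B (the rewrite author's own statement) =====
-- stated objective: idiomatic
-- what changed: Replaces the dict of last-eaten indices and index arithmetic by a sliding-window deque of the K most recently eaten dishes (plus a membership set) with explicit FIFO eviction.
import Mathlib
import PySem

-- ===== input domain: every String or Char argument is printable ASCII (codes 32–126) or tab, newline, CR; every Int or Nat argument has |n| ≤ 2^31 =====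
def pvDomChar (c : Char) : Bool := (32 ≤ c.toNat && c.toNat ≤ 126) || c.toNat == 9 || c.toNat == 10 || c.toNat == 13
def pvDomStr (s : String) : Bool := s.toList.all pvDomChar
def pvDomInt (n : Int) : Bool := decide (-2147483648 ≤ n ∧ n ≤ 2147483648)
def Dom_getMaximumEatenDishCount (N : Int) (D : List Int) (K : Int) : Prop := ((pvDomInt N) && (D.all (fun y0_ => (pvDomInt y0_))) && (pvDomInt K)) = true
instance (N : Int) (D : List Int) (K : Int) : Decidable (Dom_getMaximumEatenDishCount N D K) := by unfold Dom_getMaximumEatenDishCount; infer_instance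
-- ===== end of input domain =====

-- B replaces A's dict of eaten-indices and index arithmetic by a sliding-window
-- FIFO (deque + set) of the K most recently eaten dishes with explicit eviction.

-- ===== PORT A =====
-- state: (window : dict dish ↦ eaten-index, eaten_counter)
def kzStepA (K : Int) (st : PySem.Dict Int Int × Int) (d : Int) : PySem.Dict Int Int × Int :=
  if !(st.1.contains d) || (st.2 - st.1.getD d 0 > K) then (st.1.insert d st.2, st.2 + 1) else st

def getMaximumEatenDishCount (N : Int) (D : List Int) (K : Int) : Int :=
  (D.foldl (kzStepA K) (PySem.Dict.empty, 0)).2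

-- ===== PORT B =====
-- state: (recent : FIFO of recently eaten dishes, oldest first; recent_set; count)
-- '.headD 0' totalizes recent.popleft(): the deque was just appended to, so it is never empty there.
def kzStepB (K : Int) (st : List Int × PySem.Set Int × Int) (d : Int) : List Int × PySem.Set Int × Int :=
  if PySem.Set.contains st.2.1 d then st
  else
    let r := st.1 ++ [d]
    let s := PySem.Set.add st.2.1 d
    if (r.length : Int) > K then (r.drop 1, PySem.Set.discard s (r.headD 0), st.2.2 + 1)
    else (r, s, st.2.2 + 1)

def getMaximumEatenDishCount_alt (N : Int) (D : List Int) (K : Int) : Int :=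
  (D.foldl (kzStepB K) ([], PySem.Set.empty, 0)).2.2

-- ===== PRECONDITION & SPEC =====
def Spec_getMaximumEatenDishCount (N : Int) (D : List Int) (K : Int) (out : Int) : Prop := out = getMaximumEatenDishCount_alt N D K
instance (N : Int) (D : List Int) (K : Int) (out : Int) : Decidable (Spec_getMaximumEatenDishCount N D K out) := by unfold Spec_getMaximumEatenDishCount; infer_instance

-- ===== CLAIM (what is proved, stated in full; the proofs are below) =====
def Claim_equal_getMaximumEatenDishCount : Prop := ∀ (N : Int) (D : List Int) (K : Int), Dom_getMaximumEatenDishCount N D K → Spec_getMaximumEatenDishCount N D K (getMaximumEatenDishCount N D K)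

-- ===== LEMMAS AND PROOFS =====

-- Invariant tying A's state (w, c) to B's window r and set s:
-- r holds exactly the dishes whose recorded eaten-index lies within K of c,
-- ordered by eaten-index c - r.length, …, c - 1; s has the same members as r.
def kzInv (K : Int) (w : PySem.Dict Int Int) (r : List Int) (s : PySem.Set Int) (c : Int) : Prop :=
  ((r.length : Int) ≤ max K 0) ∧
  (∀ j : Nat, (h : j < r.length) → w.get? r[j] = some (c - r.length + j)) ∧
  (∀ d i, w.get? d = some i → c - i ≤ K → d ∈ r) ∧
  (∀ x : Int, x ∈ s ↔ x ∈ r)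

lemma kzInv_mem {K : Int} {w : PySem.Dict Int Int} {r : List Int} {s : PySem.Set Int} {c : Int}
    (h : kzInv K w r s c) {d : Int} (hd : d ∈ r) :
    ∃ i, w.get? d = some i ∧ c - i ≤ K := by
  obtain ⟨j, hj, rfl⟩ := List.mem_iff_getElem.mp hd
  refine ⟨c - r.length + j, h.2.1 j hj, ?_⟩
  have h1 : (1 : Int) ≤ (r.length : Int) := by exact_mod_cast Nat.one_le_iff_ne_zero.mpr (by omega)
  have := h.1
  omega

lemma kzInv_nodup {K : Int} {w : PySem.Dict Int Int} {r : List Int} {s : PySem.Set Int} {c : Int}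
    (h : kzInv K w r s c) : r.Nodup := by
  rw [List.nodup_iff_injective_get]
  intro i j hij
  have hi := h.2.1 i.1 i.2
  have hj := h.2.1 j.1 j.2
  simp only [List.get_eq_getElem] at hij
  rw [hij, hj] at hi
  injection hi with hi
  have : (i.1 : Int) = j.1 := by omega
  exact Fin.ext (by exact_mod_cast this)

lemma kzStep_pres (K : Int) (w : PySem.Dict Int Int) (r : List Int) (s : PySem.Set Int) (c d : Int)
    (h : kzInv K w r s c) :
    (kzStepA K (w, c) d).2 = (kzStepB K (r, s, c) d).2.2 ∧
    kzInv K (kzStepA K (w, c) d).1 (kzStepB K (r, s, c) d).1 (kzStepB K (r, s, c) d).2.1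
      (kzStepA K (w, c) d).2 := by
  by_cases hm : d ∈ r
  · -- dish is in the window: both sides skip
    obtain ⟨i, hi, hik⟩ := kzInv_mem h hm
    have hc : w.contains d = true := by
      rw [PySem.Dict.contains_eq_isSome_get?, hi]; rfl
    have hgd : w.getD d 0 = i := PySem.Dict.getD_of_get?_eq_some w 0 hi
    have hA : kzStepA K (w, c) d = (w, c) := by
      unfold kzStepA; rw [if_neg]; simp [hc, hgd]; omega
    have hsd : PySem.Set.contains s d = true := by
      simp only [PySem.Set.contains_eq_listContains, List.contains_eq_mem, decide_eq_true_eq]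
      exact (h.2.2.2 d).mpr hm
    have hB : kzStepB K (r, s, c) d = (r, s, c) := by
      unfold kzStepB; rw [if_pos hsd]
    rw [hA, hB]; exact ⟨rfl, h⟩
  · -- dish not in the window: both sides eat
    have hsd : ¬ PySem.Set.contains s d = true := by
      simp only [PySem.Set.contains_eq_listContains, List.contains_eq_mem, decide_eq_true_eq]
      exact fun hc => hm ((h.2.2.2 d).mp hc)
    have hAcond : (!w.contains d || decide (c - w.getD d 0 > K)) = true := by
      cases hw : w.get? d with
      | none =>
        have : w.contains d = false := by
          rw [PySem.Dict.contains_eq_isSome_get?, hw]; rfl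
        simp [this]
      | some i =>
        have hni : ¬ (c - i ≤ K) := fun hle => hm (h.2.2.1 d i hw hle)
        have hgd : w.getD d 0 = i := PySem.Dict.getD_of_get?_eq_some w 0 hw
        simp [hgd]; omega
    have hA : kzStepA K (w, c) d = (w.insert d c, c + 1) := by
      unfold kzStepA; rw [if_pos hAcond]
    rw [hA]
    by_cases hpop : ((r.length : Int) + 1) > K
    · -- window overflows: evict the oldest
      have hB : kzStepB K (r, s, c) d =
          ((r ++ [d]).drop 1, PySem.Set.discard (PySem.Set.add s d) ((r ++ [d]).headD 0), c + 1) := by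
        unfold kzStepB; rw [if_neg hsd]
        simp only [List.length_append, List.length_cons, List.length_nil]
        rw [if_pos]; push_cast; omega
      rw [hB]
      refine ⟨rfl, ?_, ?_, ?_, ?_⟩
      · simp only [List.length_drop, List.length_append, List.length_cons, List.length_nil]
        have := h.1; push_cast; omega
      · intro j hj
        simp only [List.length_drop, List.length_append, List.length_cons, List.length_nil] at hj ⊢
        rw [List.getElem_drop]
        by_cases hjn : 1 + j < r.length
        · have he : (r ++ [d])[1 + j]'(by simp; omega) = r[1 + j] :=
            List.getElem_append_left (by omega)
          have hne : r[1 + j]'hjn ≠ d := fun hc => hm (hc ▸ List.getElem_mem hjn)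
          rw [he, PySem.Dict.get?_insert_of_ne w c hne, h.2.1 (1 + j) hjn]
          congr 1; push_cast; omega
        · have hj1 : 1 + j = r.length := by omega
          have he : (r ++ [d])[1 + j]'(by simp; omega) = d := by
            rw [List.getElem_append_right (by omega)]; simp [hj1]
          rw [he, PySem.Dict.get?_insert_self]
          congr 1; push_cast; omega
      · intro d' i hdi hle
        rw [PySem.Dict.get?_insert] at hdi
        by_cases hdd : d' = d
        · subst hdd
          rw [if_pos rfl] at hdi
          injection hdi with hi; subst hi
          have hr : r.length ≠ 0 := by
            intro h0; rw [h0] at hpop; omega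
          rw [List.drop_append_of_le_length (by omega)]
          exact List.mem_append_right _ (by simp)
        · rw [if_neg hdd] at hdi
          have hmem : d' ∈ r := h.2.2.1 d' i hdi (by omega)
          obtain ⟨j, hj, rfl⟩ := List.mem_iff_getElem.mp hmem
          have hij : i = c - r.length + j := by
            have := h.2.1 j hj; rw [hdi] at this; exact Option.some.inj this
          have hj1 : 1 ≤ j := by
            have hcast : (j : Int) < r.length := by exact_mod_cast hj
            omega
          refine List.mem_iff_getElem.mpr ⟨j - 1, by simp; omega, ?_⟩
          rw [List.getElem_drop]
          simp only [show 1 + (j - 1) = j from by omega]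
          exact List.getElem_append_left hj
      · -- set clause after eviction
        intro x
        have hnd : r.Nodup := kzInv_nodup h
        rw [PySem.Set.mem_discard, PySem.Set.mem_add, h.2.2.2 x]
        cases r with
        | nil => simp
        | cons hd tl =>
          have hhd : (hd :: tl ++ [d]).headD 0 = hd := rfl
          rw [hhd]
          have hdrop : (hd :: tl ++ [d]).drop 1 = tl ++ [d] := rfl
          rw [hdrop]
          simp only [List.mem_cons, List.mem_append, List.not_mem_nil, or_false]
          constructor
          · rintro ⟨(hx | hx) | hx, hne⟩
            · exact absurd hx hne
            · exact Or.inl hx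
            · exact Or.inr hx
          · rintro (hx | hx)
            · have hne : x ≠ hd := by
                intro hxe; subst hxe
                exact (List.nodup_cons.mp hnd).1 hx
              exact ⟨Or.inl (Or.inr hx), hne⟩
            · subst hx
              refine ⟨Or.inr rfl, ?_⟩
              intro hxe; subst hxe
              exact hm (List.mem_cons_self)
    · -- window still has room
      have hB : kzStepB K (r, s, c) d = (r ++ [d], PySem.Set.add s d, c + 1) := by
        unfold kzStepB; rw [if_neg hsd]
        simp only [List.length_append, List.length_cons, List.length_nil]
        rw [if_neg]; push_cast; omega
      rw [hB]
      refine ⟨rfl, ?_, ?_, ?_, ?_⟩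
      · simp only [List.length_append, List.length_cons, List.length_nil]
        push_cast; omega
      · intro j hj
        simp only [List.length_append, List.length_cons, List.length_nil] at hj ⊢
        by_cases hjn : j < r.length
        · have he : (r ++ [d])[j]'(by simp; omega) = r[j] :=
            List.getElem_append_left (by omega)
          have hne : r[j]'hjn ≠ d := fun hc => hm (hc ▸ List.getElem_mem hjn)
          rw [he, PySem.Dict.get?_insert_of_ne w c hne, h.2.1 j hjn]
          congr 1; push_cast; omega
        · have hj1 : j = r.length := by omega
          have he : (r ++ [d])[j]'(by simp; omega) = d := by
            rw [List.getElem_append_right (by omega)]; simp [hj1]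
          rw [he, PySem.Dict.get?_insert_self]
          congr 1; push_cast; omega
      · intro d' i hdi hle
        rw [PySem.Dict.get?_insert] at hdi
        by_cases hdd : d' = d
        · subst hdd; exact List.mem_append_right _ (by simp)
        · rw [if_neg hdd] at hdi
          exact List.mem_append_left _ (h.2.2.1 d' i hdi (by omega))
      · intro x
        rw [PySem.Set.mem_add, h.2.2.2 x]
        simp [List.mem_append, or_comm]
lemma kzLoop (K : Int) (D : List Int) :
    ∀ w r s c, kzInv K w r s c →
      (D.foldl (kzStepA K) (w, c)).2 = (D.foldl (kzStepB K) (r, s, c)).2.2 := by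
  induction D with
  | nil => intro w r s c _; rfl
  | cons d D ih =>
    intro w r s c h
    have hs := kzStep_pres K w r s c d h
    simp only [List.foldl_cons]
    have hA : kzStepA K (w, c) d = ((kzStepA K (w, c) d).1, (kzStepA K (w, c) d).2) := rfl
    have hB : kzStepB K (r, s, c) d
        = ((kzStepB K (r, s, c) d).1, (kzStepB K (r, s, c) d).2.1, (kzStepB K (r, s, c) d).2.2) := rfl
    rw [hA, hB, ← hs.1]
    exact ih _ _ _ _ hs.2

lemma kzInv_init (K : Int) : kzInv K PySem.Dict.empty [] PySem.Set.empty 0 := by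
  refine ⟨by simp, by simp, ?_, by simp [PySem.Set.empty]⟩
  intro d i hd
  simp [PySem.Dict.get?_empty] at hd

-- ===== VERDICT (by name: the statement is the Claim_ definition above) =====
theorem getMaximumEatenDishCount_spec : Claim_equal_getMaximumEatenDishCount := by
  intro N D K _
  unfold Spec_getMaximumEatenDishCount getMaximumEatenDishCount getMaximumEatenDishCount_alt
  exact kzLoop K D _ _ _ _ (kzInv_init K)
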